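-- pv_equiv track=rewrite | github.com/Renatorp93/ats_score_resume | src/ats_score_resume/app.py | split_draft_sections
-- ===== SOURCE A (Python) =====
-- def split_draft_sections(draft_text: str) -> list[tuple[str | None, str]]:
--     lines = draft_text.splitlines()
--     sections: list[tuple[str | None, list[str]]] = []
--     current_heading: str | None = None
--     current_lines: list[str] = []
--
--     for line in lines:
--         if is_all_caps_heading(line):
--             if current_heading is not None or current_lines:
--                 sections.append((current_heading, current_lines))
--             current_heading = line.strip()
--             current_lines = []
--             continue
--         current_lines.append(line.rstrip())
--
--     if current_heading is not None or current_lines: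
--         sections.append((current_heading, current_lines))
--
--     normalized: list[tuple[str | None, str]] = []
--     for heading, content_lines in sections:
--         content = "\n".join(content_lines).strip()
--         normalized.append((heading, content))
--     return normalized
--
-- def is_all_caps_heading(line: str) -> bool:
--     stripped = line.strip()
--     if not stripped:
--         return False
--     letters = [char for char in stripped if char.isalpha()]
--     return bool(letters) and all(char.isupper() for char in letters)
-- ===== SOURCE B (Python) =====
-- def is_all_caps_heading(line: str) -> bool:
--     stripped = line.strip()
--     if not stripped:
--         return False
--     letters = [char for char in stripped if char.isalpha()]
--     return bool(letters) and all(char.isupper() for char in letters)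
--
--
-- def split_draft_sections(draft_text: str) -> list[tuple[str | None, str]]:
--     lines = draft_text.splitlines()
--
--     def gather(rest: list[str]) -> tuple[list[str], list[str]]:
--         # collect rstripped content lines up to (not including) the next heading
--         body: list[str] = []
--         while rest and not is_all_caps_heading(rest[0]):
--             body.append(rest[0].rstrip())
--             rest = rest[1:]
--         return body, rest
--
--     segments: list[tuple[str | None, list[str]]] = []
--     body, rest = gather(lines)
--     if body:
--         segments.append((None, body))
--     while rest:
--         heading = rest[0].strip()
--         body, rest = gather(rest[1:])
--         segments.append((heading, body))
--     return [(h, "\n".join(b).strip()) for h, b in segments]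
-- ===== Notes on version B (the rewrite author's own statement) =====
-- stated objective: alternative
-- what changed: Replaces A's single accumulating state machine (sections/current_heading/current_lines mutated per line, with a trailing flush) by a span-based grouping: gather the content block before each heading, emit the optional leading None-segment, then one segment per heading by repeatedly splitting the remaining lines at the next heading.
import Mathlib
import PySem

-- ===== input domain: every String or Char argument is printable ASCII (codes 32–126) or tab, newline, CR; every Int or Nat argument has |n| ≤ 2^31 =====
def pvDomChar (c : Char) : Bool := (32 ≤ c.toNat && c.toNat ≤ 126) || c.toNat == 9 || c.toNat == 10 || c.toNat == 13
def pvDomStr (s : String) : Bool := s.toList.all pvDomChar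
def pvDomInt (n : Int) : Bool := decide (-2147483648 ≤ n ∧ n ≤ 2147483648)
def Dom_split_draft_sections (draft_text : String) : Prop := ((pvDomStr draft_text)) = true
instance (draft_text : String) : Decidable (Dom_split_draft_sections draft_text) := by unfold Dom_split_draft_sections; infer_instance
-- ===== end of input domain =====

-- B replaces A's single accumulating state machine by a span-based grouping
-- (gather the content block before each heading, one segment per heading);
-- objective: alternative decomposition, same value on every input.

-- ===== PORT A =====
-- shared helper, line for line the Python is_all_caps_heading (used by both sources)
def is_all_caps_heading (line : String) : Bool :=
  let stripped := PySem.Chars.strip line.toList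
  if stripped = [] then false
  else
    let letters := stripped.filter (fun c => PySem.Chars.isalpha c)
    decide (letters ≠ []) && letters.all (fun c => PySem.Chars.isupper c)

-- A's flush conditional: 'if current_heading is not None or current_lines: sections.append(...)'
-- (appears twice in the Python, inside the loop and after it)
def pvFinal (st : List (Option String × List String) × Option String × List String) :
    List (Option String × List String) :=
  if st.2.1.isSome ∨ st.2.2 ≠ [] then st.1 ++ [(st.2.1, st.2.2)] else st.1

-- the body of A's for-loop, state = (sections, current_heading, current_lines)
def pvAStep (st : List (Option String × List String) × Option String × List String)
    (line : String) : List (Option String × List String) × Option String × List String :=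
  if is_all_caps_heading line then
    (pvFinal st, some (PySem.Str.strip line), [])
  else
    (st.1, st.2.1, st.2.2 ++ [PySem.Str.rstrip line])

def split_draft_sections (draft_text : String) : List (Option String × String) :=
  let lines := PySem.Str.splitlines draft_text
  let sections := pvFinal (lines.foldl pvAStep ([], none, []))
  sections.map (fun p => (p.1, PySem.Str.strip (PySem.Str.join "\n" p.2)))

-- ===== PORT B =====
-- B's gather: rstripped content lines up to (not including) the next heading, plus the rest
def pvGather : List String → List String × List String
  | [] => ([], [])
  | l :: rest =>
    if is_all_caps_heading l then ([], l :: rest)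
    else
      let p := pvGather rest
      (PySem.Str.rstrip l :: p.1, p.2)

-- termination measure for B's while loop over `rest`
theorem pvGather_snd_length_le : ∀ (ls : List String), (pvGather ls).2.length ≤ ls.length := by
  intro ls
  induction ls with
  | nil => simp [pvGather]
  | cons l rest ih =>
    by_cases h : is_all_caps_heading l = true <;> simp [pvGather, h]
    omega

-- B's while loop: one segment per heading
def pvBLoop : List String → List (Option String × List String)
  | [] => []
  | h :: rest =>
    (some (PySem.Str.strip h), (pvGather rest).1) :: pvBLoop (pvGather rest).2
termination_by ls => ls.length
decreasing_by
  have := pvGather_snd_length_le rest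
  simp only [List.length_cons]
  omega

def split_draft_sections_alt (draft_text : String) : List (Option String × String) :=
  let lines := PySem.Str.splitlines draft_text
  let p := pvGather lines
  let segments :=
    (if p.1 ≠ [] then [((none : Option String), p.1)] else []) ++ pvBLoop p.2
  segments.map (fun s => (s.1, PySem.Str.strip (PySem.Str.join "\n" s.2)))

-- ===== PRECONDITION & SPEC =====
def Spec_split_draft_sections (draft_text : String) (out : List (Option String × String)) : Prop := out = split_draft_sections_alt draft_text
instance (draft_text : String) (out : List (Option String × String)) : Decidable (Spec_split_draft_sections draft_text out) := by unfold Spec_split_draft_sections; infer_instance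

-- ===== CLAIM (what is proved, stated in full; the proofs are below) =====
def Claim_equal_split_draft_sections : Prop := ∀ (draft_text : String), Dom_split_draft_sections draft_text → Spec_split_draft_sections draft_text (split_draft_sections draft_text)

-- ===== LEMMAS AND PROOFS =====

-- pvFinal on a literal state, in appended form
theorem pvFinal_mk (acc : List (Option String × List String)) (ch : Option String)
    (cl : List String) :
    pvFinal (acc, ch, cl) = acc ++ (if ch.isSome = true ∨ cl ≠ [] then [(ch, cl)] else []) := by
  unfold pvFinal
  split <;> simp

-- the accumulated sections list only grows by appending: factor it out
theorem pvFinal_foldl_acc : ∀ (lines : List String) (acc : List (Option String × List String))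
    (ch : Option String) (cl : List String),
    pvFinal (lines.foldl pvAStep (acc, ch, cl)) =
      acc ++ pvFinal (lines.foldl pvAStep ([], ch, cl)) := by
  intro lines
  induction lines with
  | nil => intro acc ch cl; simp [pvFinal]; split <;> simp
  | cons l ls ih =>
    intro acc ch cl
    by_cases h : is_all_caps_heading l = true
    · simp only [List.foldl_cons, pvAStep, h, if_pos, pvFinal_mk, List.nil_append]
      by_cases hc : (ch.isSome = true ∨ cl ≠ [])
      · simp only [if_pos hc]
        rw [ih (acc ++ [(ch, cl)]), ih [(ch, cl)]]
        simp
      · simp only [if_neg hc, List.append_nil]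
        exact ih acc (some (PySem.Str.strip l)) []
    · simp only [List.foldl_cons, pvAStep, h, if_neg, Bool.false_eq_true, not_false_iff]
      exact ih acc ch (cl ++ [PySem.Str.rstrip l])

-- from a state with a current heading, A produces exactly B's heading segments
theorem pvFoldl_some : ∀ (lines : List String) (h : String) (cl : List String),
    pvFinal (lines.foldl pvAStep ([], some h, cl)) =
      (some h, cl ++ (pvGather lines).1) :: pvBLoop (pvGather lines).2 := by
  intro lines
  induction lines with
  | nil => intro h cl; simp [pvFinal, pvGather, pvBLoop]
  | cons l ls ih =>
    intro h cl
    by_cases hl : is_all_caps_heading l = true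
    · simp only [List.foldl_cons, pvAStep, hl, if_pos, pvFinal_mk, Option.isSome_some,
        ne_eq, true_or, List.nil_append]
      rw [pvFinal_foldl_acc, ih]
      simp [pvGather, hl, pvBLoop]
    · simp only [List.foldl_cons, pvAStep, hl, Bool.false_eq_true, if_neg, not_false_iff]
      rw [ih h (cl ++ [PySem.Str.rstrip l])]
      simp [pvGather, hl]

-- from the initial headingless state, A produces B's optional leading segment then the rest
theorem pvFoldl_none : ∀ (lines : List String) (cl : List String),
    pvFinal (lines.foldl pvAStep ([], none, cl)) =
      (if cl ++ (pvGather lines).1 ≠ [] then [((none : Option String), cl ++ (pvGather lines).1)] else [])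
        ++ pvBLoop (pvGather lines).2 := by
  intro lines
  induction lines with
  | nil => intro cl; simp [pvFinal, pvGather, pvBLoop]
  | cons l ls ih =>
    intro cl
    by_cases hl : is_all_caps_heading l = true
    · simp only [List.foldl_cons, pvAStep, hl, if_pos, pvFinal_mk, Option.isSome_none,
        Bool.false_eq_true, false_or, List.nil_append]
      rw [pvFinal_foldl_acc, pvFoldl_some]
      simp [pvGather, hl, pvBLoop]
    · simp only [List.foldl_cons, pvAStep, hl, Bool.false_eq_true, if_neg, not_false_iff]
      rw [ih (cl ++ [PySem.Str.rstrip l])]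
      simp [pvGather, hl]

-- ===== VERDICT (by name: the statement is the Claim_ definition above) =====
theorem split_draft_sections_spec : Claim_equal_split_draft_sections := by
  intro draft_text _
  simp only [Spec_split_draft_sections, split_draft_sections, split_draft_sections_alt]
  rw [pvFoldl_none (PySem.Str.splitlines draft_text) []]
  simp
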